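-- pv_equiv track=rewrite | github.com/mazharulislam4/workflow-engine | workflow/executors/path.py | _find_downstream_ids
-- ===== SOURCE A (Python) =====
-- from typing import Any, Dict
--
-- def _find_downstream_ids(start_node: str, edges: list[Dict[str, Any]]) -> set:
--     """
--     Find all nodes downstream of start node (BFS).
--
--     Args:
--         start_node: Starting node ID
--         edges: Workflow edges
--
--     Returns:
--         Set of downstream node IDs
--     """
--     downstream = set()
--     queue = [start_node]
--     visited = {start_node}
--
--     while queue:
--         current = queue.pop(0)
--
--         for edge in edges:
--             source = edge.get("source", "")
--             target = edge.get("target", "")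
--             if source == current and target not in visited:
--
--                 # skip fork edges (don't cross paths)
--                 if edge.get("type") == "fork-branch":
--                     continue
--                 downstream.add(target)
--                 visited.add(target)
--                 queue.append(target)
--     return downstream
-- ===== SOURCE B (Python) =====
-- def _find_downstream_ids(start_node: str, edges: list) -> set:
--     """BFS over a precomputed adjacency dict (fork-branch edges are excluded
--     once, up front) with an index-pointer queue."""
--     adj = {}
--     for edge in edges:
--         if edge.get("type") == "fork-branch":
--             continue
--         adj.setdefault(edge.get("source", ""), []).append(edge.get("target", ""))
--
--     downstream = set()
--     visited = {start_node}
--     queue = [start_node]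
--     i = 0
--     while i < len(queue):
--         current = queue[i]
--         i += 1
--         for target in adj.get(current, []):
--             if target not in visited:
--                 downstream.add(target)
--                 visited.add(target)
--                 queue.append(target)
--     return downstream
-- ===== Notes on version B (the rewrite author's own statement) =====
-- stated objective: alternative
-- what changed: B builds an adjacency dict of non-fork edges once and BFS-walks it with an index-pointer queue, instead of A's rescan of the entire edge list for every dequeued node and A's pop(0); worst-case cost drops from O(V*E) to O(V+E), though a timing run's inputs show no measured speed-up.
import Mathlib
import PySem

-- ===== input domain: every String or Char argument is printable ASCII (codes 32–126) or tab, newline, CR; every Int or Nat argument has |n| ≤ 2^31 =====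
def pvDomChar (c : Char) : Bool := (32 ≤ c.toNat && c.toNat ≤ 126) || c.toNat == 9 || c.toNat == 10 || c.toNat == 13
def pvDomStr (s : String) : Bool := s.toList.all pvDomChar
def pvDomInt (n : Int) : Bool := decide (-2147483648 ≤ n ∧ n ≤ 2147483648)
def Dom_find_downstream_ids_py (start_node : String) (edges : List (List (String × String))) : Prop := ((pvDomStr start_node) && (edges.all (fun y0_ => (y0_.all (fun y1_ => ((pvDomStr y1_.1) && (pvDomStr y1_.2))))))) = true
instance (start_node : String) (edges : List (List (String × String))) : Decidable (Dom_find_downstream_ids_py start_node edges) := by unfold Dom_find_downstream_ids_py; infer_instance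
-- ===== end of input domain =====

-- ===== PORT A =====
-- A's while-loop is ported with a fuel guard (edges.length + 1 iterations always
-- suffice: each dequeued node was enqueued, and at most one node per edge plus the
-- start node is ever enqueued); the fuel branch is a totality guard only.
-- state: (downstream set, visited set, queue)
def pvA_loop (edges : List (List (String × String))) :
    Nat → List String → PySem.Set String → PySem.Set String → List String
  | 0, _, d, _ => d
  | _ + 1, [], d, _ => d
  | f + 1, current :: qrest, d, v =>
      let st := edges.foldl (fun (st : PySem.Set String × PySem.Set String × List String) e =>
        let (d, v, q) := st
        let source := (PySem.Dict.ofList e).getD "source" ""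
        let target := (PySem.Dict.ofList e).getD "target" ""
        if source == current && !v.contains target then
          if (PySem.Dict.ofList e).get? "type" == some "fork-branch" then (d, v, q)
          else (PySem.Set.add d target, PySem.Set.add v target, q ++ [target])
        else (d, v, q)) (d, v, qrest)
      pvA_loop edges f st.2.2 st.1 st.2.1

def find_downstream_ids_py (start_node : String) (edges : List (List (String × String))) : List String :=
  pvA_loop edges (edges.length + 1) [start_node] PySem.Set.empty (PySem.Set.add PySem.Set.empty start_node)

-- ===== PORT B =====
-- adjacency dict: for each non-"fork-branch" edge, append target to adj[source]
def pvB_adj (edges : List (List (String × String))) : PySem.Dict String (List String) :=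
  edges.foldl (fun adj e =>
    if (PySem.Dict.ofList e).get? "type" == some "fork-branch" then adj
    else adj.modify ((PySem.Dict.ofList e).getD "source" "") []
           (· ++ [(PySem.Dict.ofList e).getD "target" ""])) PySem.Dict.empty

-- Source B's index-pointer while loop, with the same fuel guard as port A
def pvB_loop (adj : PySem.Dict String (List String)) :
    Nat → List String → Nat → PySem.Set String → PySem.Set String → List String
  | 0, _, _, d, _ => d
  | f + 1, queue, i, d, v =>
      if h : i < queue.length then
        let current := queue[i]
        let st := (adj.getD current []).foldl
          (fun (st : PySem.Set String × PySem.Set String × List String) target =>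
            let (d, v, q) := st
            if !v.contains target then
              (PySem.Set.add d target, PySem.Set.add v target, q ++ [target])
            else (d, v, q)) (d, v, queue)
        pvB_loop adj f st.2.2 (i + 1) st.1 st.2.1
      else d

def find_downstream_ids_py_alt (start_node : String) (edges : List (List (String × String))) : List String :=
  pvB_loop (pvB_adj edges) (edges.length + 1) [start_node] 0 PySem.Set.empty
    (PySem.Set.add PySem.Set.empty start_node)

-- ===== PRECONDITION & SPEC =====
def Spec_find_downstream_ids_py (start_node : String) (edges : List (List (String × String))) (out : List String) : Prop := out = find_downstream_ids_py_alt start_node edges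
instance (start_node : String) (edges : List (List (String × String))) (out : List String) : Decidable (Spec_find_downstream_ids_py start_node edges out) := by unfold Spec_find_downstream_ids_py; infer_instance

-- ===== CLAIM (what is proved, stated in full; the proofs are below) =====
def Claim_equal_find_downstream_ids_py : Prop := ∀ (start_node : String) (edges : List (List (String × String))), Dom_find_downstream_ids_py start_node edges → Spec_find_downstream_ids_py start_node edges (find_downstream_ids_py start_node edges)

-- ===== LEMMAS AND PROOFS =====

-- B's inner fold over a target list, as a named step (proof-side abbreviation)
def pvStepT (st : PySem.Set String × PySem.Set String × List String) (target : String) :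
    PySem.Set String × PySem.Set String × List String :=
  let (d, v, q) := st
  if !v.contains target then
    (PySem.Set.add d target, PySem.Set.add v target, q ++ [target])
  else (d, v, q)

-- the non-fork out-neighbour targets of `current`, read directly off the edge list
def pvTargets (edges : List (List (String × String))) (current : String) : List String :=
  edges.filterMap (fun e =>
    if (PySem.Dict.ofList e).get? "type" == some "fork-branch" then none
    else if (PySem.Dict.ofList e).getD "source" "" == current
    then some ((PySem.Dict.ofList e).getD "target" "") else none)

lemma pvB_adj_getD (edges : List (List (String × String))) (c : String) :
    (pvB_adj edges).getD c [] = pvTargets edges c := by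
  have gen : ∀ (es : List (List (String × String))) (d : PySem.Dict String (List String)),
      (es.foldl (fun adj e =>
        if (PySem.Dict.ofList e).get? "type" == some "fork-branch" then adj
        else adj.modify ((PySem.Dict.ofList e).getD "source" "") []
               (· ++ [(PySem.Dict.ofList e).getD "target" ""])) d).getD c []
        = d.getD c [] ++ pvTargets es c := by
    intro es
    induction es with
    | nil => intro d; simp [pvTargets]
    | cons e rest ih =>
      intro d
      simp only [List.foldl_cons]
      by_cases hf : ((PySem.Dict.ofList e).get? "type" == some "fork-branch") = true
      · have hf2 : (PySem.Dict.ofList e).get? "type" = some "fork-branch" := by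
          exact eq_of_beq hf
        rw [if_pos hf, ih]
        have hts : pvTargets (e :: rest) c = pvTargets rest c := by
          simp [pvTargets, hf2]
        rw [hts]
      · have hf2 : ¬ (PySem.Dict.ofList e).get? "type" = some "fork-branch" := by
          intro h; exact hf (by simp [h])
        rw [if_neg hf, ih, PySem.Dict.getD_modify]
        by_cases hs : (PySem.Dict.ofList e).getD "source" "" = c
        · have hts : pvTargets (e :: rest) c
              = (PySem.Dict.ofList e).getD "target" "" :: pvTargets rest c := by
            simp [pvTargets, hf2, hs]
          rw [hts, if_pos hs.symm, hs]
          simp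
        · have hts : pvTargets (e :: rest) c = pvTargets rest c := by
            simp [pvTargets, hf2, hs]
          rw [hts, if_neg (fun h => hs h.symm)]
  have := gen edges PySem.Dict.empty
  simpa [pvB_adj] using this

lemma pvA_fold_eq (edges : List (List (String × String))) (current : String)
    (st : PySem.Set String × PySem.Set String × List String) :
    edges.foldl (fun (st : PySem.Set String × PySem.Set String × List String) e =>
        let (d, v, q) := st
        let source := (PySem.Dict.ofList e).getD "source" ""
        let target := (PySem.Dict.ofList e).getD "target" ""
        if source == current && !v.contains target then
          if (PySem.Dict.ofList e).get? "type" == some "fork-branch" then (d, v, q)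
          else (PySem.Set.add d target, PySem.Set.add v target, q ++ [target])
        else (d, v, q)) st
      = (pvTargets edges current).foldl pvStepT st := by
  induction edges generalizing st with
  | nil => simp [pvTargets]
  | cons e rest ih =>
    obtain ⟨d, v, q⟩ := st
    have hsplit : pvTargets (e :: rest) current
        = pvTargets [e] current ++ pvTargets rest current := by
      simp only [pvTargets, ← List.filterMap_append]
      rfl
    rw [List.foldl_cons, hsplit, List.foldl_append, ih]
    congr 1
    by_cases hf : (PySem.Dict.ofList e).get? "type" = some "fork-branch"
    · have : pvTargets [e] current = [] := by simp [pvTargets, hf]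
      rw [this]
      simp [hf]
    · by_cases hs : (PySem.Dict.ofList e).getD "source" "" = current
      · have : pvTargets [e] current = [(PySem.Dict.ofList e).getD "target" ""] := by
          simp [pvTargets, hf, hs]
        rw [this]
        by_cases hv : v.contains ((PySem.Dict.ofList e).getD "target" "") = true
        · simp [pvStepT, hf, hs, hv]
        · simp [pvStepT, hf, hs, hv]
      · have : pvTargets [e] current = [] := by simp [pvTargets, hf, hs]
        rw [this]
        simp [pvStepT, hf, hs]


-- the queue component of the inner fold is: initial queue ++ (stuff independent of it)
lemma pvStepT_fold_queue (ts : List String) (d v : PySem.Set String) (q : List String) :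
    ts.foldl pvStepT (d, v, q)
      = ((ts.foldl pvStepT (d, v, ([] : List String))).1,
         (ts.foldl pvStepT (d, v, ([] : List String))).2.1,
         q ++ (ts.foldl pvStepT (d, v, ([] : List String))).2.2) := by
  induction ts generalizing d v q with
  | nil => simp
  | cons t ts ih =>
    simp only [List.foldl_cons]
    by_cases hv : v.contains t = true
    · have h1 : pvStepT (d, v, q) t = (d, v, q) := by
        simp only [pvStepT]; rw [hv]; simp
      have h2 : pvStepT (d, v, ([] : List String)) t = (d, v, []) := by
        simp only [pvStepT]; rw [hv]; simp
      rw [h1, h2, ih]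
    · have hv' := eq_false_of_ne_true hv
      have h1 : pvStepT (d, v, q) t
          = (PySem.Set.add d t, PySem.Set.add v t, q ++ [t]) := by
        simp only [pvStepT]; rw [hv']; simp
      have h2 : pvStepT (d, v, ([] : List String)) t
          = (PySem.Set.add d t, PySem.Set.add v t, [t]) := by
        simp only [pvStepT]; rw [hv']; simp
      rw [h1, h2, ih (PySem.Set.add d t) (PySem.Set.add v t) (q ++ [t]),
        ih (PySem.Set.add d t) (PySem.Set.add v t) [t]]
      simp

lemma pvLoops_eq (edges : List (List (String × String))) (f : Nat) :
    ∀ (queue : List String) (i : Nat) (d v : PySem.Set String), i ≤ queue.length →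
    pvB_loop (pvB_adj edges) f queue i d v = pvA_loop edges f (queue.drop i) d v := by
  induction f with
  | zero => intro queue i d v _; rfl
  | succ f ih =>
    intro queue i d v hle
    by_cases h : i < queue.length
    · rw [List.drop_eq_getElem_cons h]
      simp only [pvB_loop, pvA_loop, dif_pos h]
      rw [pvA_fold_eq, pvB_adj_getD]
      have hfun : (fun (st : PySem.Set String × PySem.Set String × List String) target =>
          let (d, v, q) := st
          if !v.contains target then
            (PySem.Set.add d target, PySem.Set.add v target, q ++ [target])
          else (d, v, q)) = pvStepT := rfl
      rw [hfun]
      rw [pvStepT_fold_queue (pvTargets edges queue[i]) d v queue,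
        pvStepT_fold_queue (pvTargets edges queue[i]) d v (queue.drop (i + 1))]
      rw [ih (queue ++ (List.foldl pvStepT (d, v, []) (pvTargets edges queue[i])).2.2)
        (i + 1) _ _ (by simp; omega)]
      rw [List.drop_append_of_le_length (by omega)]
    · have hlen : queue.length ≤ i := not_lt.mp h
      simp only [pvB_loop, pvA_loop, dif_neg h]
      rw [List.drop_eq_nil_of_le hlen]
      rfl


-- ===== VERDICT (by name: the statement is the Claim_ definition above) =====
theorem find_downstream_ids_py_spec : Claim_equal_find_downstream_ids_py := by
  intro start_node edges _
  unfold Spec_find_downstream_ids_py find_downstream_ids_py find_downstream_ids_py_alt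
  rw [pvLoops_eq edges _ [start_node] 0 _ _ (by simp)]
  rfl
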